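-- pv_equiv track=rewrite | github.com/ianwhale/nsga-net | macro_search_space/evolution/check_duplicates.py | count_node_IO
-- ===== SOURCE A (Python) =====
-- def count_node_IO(genome):
--     node_IO = dict()
--     keys = []
--     # first node:
--     key = '0-{}'.format(sum(x[0] for x in genome[:-1]))
--     keys.append(key)
--     for i in range(1, len(genome)-1):
--         key = '{}-{}'.format(sum(genome[i-1]), sum(x[i] for x in genome[:-1] if len(x) > i))
--         keys.append(key)
--     # last node
--     key = '{}-0'.format(sum(genome[-2]))
--     keys.append(key)
--     unique_keys = list(set(keys))
--     for k in unique_keys: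
--         node_IO[k] = sum(k == key for key in keys)
--
--     return node_IO
-- ===== SOURCE B (Python) =====
-- def count_node_IO(genome):
--     # Precompute row sums and (transposed) column sums of genome[:-1] in one pass
--     # over the data, then assemble each node's key from the tables and count it.
--     n = len(genome)
--     rowsum = [sum(x) for x in genome]
--     colsum = []
--     for x in genome[:-1]:
--         if len(x) > len(colsum):
--             colsum.extend([0] * (len(x) - len(colsum)))
--         for j, v in enumerate(x):
--             colsum[j] += v
--     node_IO = {}
--     def bump(key):
--         node_IO[key] = node_IO.get(key, 0) + 1
--     bump('0-{}'.format(colsum[0]))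
--     for i in range(1, n - 1):
--         bump('{}-{}'.format(rowsum[i - 1], colsum[i] if i < len(colsum) else 0))
--     bump('{}-0'.format(rowsum[n - 2]))
--     return node_IO
-- ===== Notes on version B (the rewrite author's own statement) =====
-- stated objective: alternative
-- what changed: B precomputes row sums and transposed column sums of genome[:-1] in one pass over the matrix data and assembles each node key from those tables, counting keys into the dict as they are produced, instead of A's per-node generator scans over genome plus a keys list, set() and a nested 'sum(k == key for key in keys)' counting rescan.
import Mathlib
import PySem

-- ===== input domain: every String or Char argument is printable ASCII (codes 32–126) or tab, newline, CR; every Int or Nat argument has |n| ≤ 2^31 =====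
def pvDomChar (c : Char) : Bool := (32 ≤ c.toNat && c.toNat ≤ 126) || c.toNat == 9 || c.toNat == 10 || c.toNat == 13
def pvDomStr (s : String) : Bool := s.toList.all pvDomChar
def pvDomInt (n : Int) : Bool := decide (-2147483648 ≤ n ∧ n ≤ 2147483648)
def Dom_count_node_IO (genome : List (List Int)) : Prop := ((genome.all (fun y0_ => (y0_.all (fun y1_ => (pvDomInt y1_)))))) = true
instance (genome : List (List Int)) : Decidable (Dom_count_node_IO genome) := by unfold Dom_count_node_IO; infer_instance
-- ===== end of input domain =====

-- B precomputes row sums and transposed column sums of genome[:-1] in one pass over the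
-- data, then assembles and counts each key from those tables — no per-node column rescans
-- and no keys-list/set()/nested counting pass (alternative decomposition).

-- ===== PORT A =====
def keyFirst (genome : List (List Int)) : String :=
  "0-" ++ PySem.Int.toStr (((PySem.List.slice genome none (some (-1))).map
    (fun x => PySem.List.pyGetD x 0 0)).sum)

def keyMid (genome : List (List Int)) (i : Int) : String :=
  PySem.Int.toStr ((PySem.List.pyGetD genome (i - 1) []).sum) ++ "-" ++
  PySem.Int.toStr ((((PySem.List.slice genome none (some (-1))).filter
    (fun x => decide (i < (x.length : Int)))).map
      (fun x => PySem.List.pyGetD x i 0)).sum)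

def keyLast (genome : List (List Int)) : String :=
  PySem.Int.toStr ((PySem.List.pyGetD genome (-2) []).sum) ++ "-0"

def count_node_IO (genome : List (List Int)) : List (String × Int) :=
  let keys : List String := [keyFirst genome]
  let keys := (PySem.List.pyRange 1 ((genome.length : Int) - 1) 1).foldl
    (fun ks i => ks ++ [keyMid genome i]) keys
  let keys := keys ++ [keyLast genome]
  let uniqueKeys : PySem.Set String := PySem.Set.ofList keys
  let nodeIO : PySem.Dict String Int := uniqueKeys.foldl
    (fun d k => d.insert k ((keys.map (fun key => if k == key then (1 : Int) else 0)).sum))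
    PySem.Dict.empty
  nodeIO.items

-- ===== PORT B =====
-- inner loop 'for j, v in enumerate(x): colsum[j] += v'
def addRowAux (cs : List Int) (x : List Int) (j : Nat) : List Int :=
  match x with
  | [] => cs
  | v :: t => addRowAux (cs.modify j (· + v)) t (j + 1)

-- one row of the column-sum pass: the 'extend' guard, then the enumerate loop
def addRow (cs : List Int) (x : List Int) : List Int :=
  let cs := if x.length > cs.length then cs ++ List.replicate (x.length - cs.length) 0 else cs
  addRowAux cs x 0

-- node_IO[key] = node_IO.get(key, 0) + 1
def bumpKey (d : PySem.Dict String Int) (k : String) : PySem.Dict String Int :=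
  d.insert k (d.getD k 0 + 1)

def keyFirstB (colsum : List Int) : String :=
  "0-" ++ PySem.Int.toStr (PySem.List.pyGetD colsum 0 0)   -- colsum[0]; in range under Pre_

def keyMidB (rowsum colsum : List Int) (i : Int) : String :=
  PySem.Int.toStr (PySem.List.pyGetD rowsum (i - 1) 0) ++ "-" ++
  PySem.Int.toStr (if i < (colsum.length : Int) then PySem.List.pyGetD colsum i 0 else 0)

def keyLastB (rowsum : List Int) (n : Int) : String :=
  PySem.Int.toStr (PySem.List.pyGetD rowsum (n - 2) 0) ++ "-0"

def count_node_IO_alt (genome : List (List Int)) : List (String × Int) :=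
  let n : Int := (genome.length : Int)
  let rowsum : List Int := genome.map List.sum
  let colsum : List Int := (PySem.List.slice genome none (some (-1))).foldl addRow []
  let d : PySem.Dict String Int := PySem.Dict.empty
  let d := bumpKey d (keyFirstB colsum)
  let d := (PySem.List.pyRange 1 (n - 1) 1).foldl
    (fun d i => bumpKey d (keyMidB rowsum colsum i)) d
  let d := bumpKey d (keyLastB rowsum n)
  d.items

-- ===== PRECONDITION & SPEC =====
-- A raises IndexError on genomes of length < 2 (genome[-2]) and whenever a row other than
-- the last is empty (x[0] in the first key's generator); these inputs are excluded.
def Pre_count_node_IO (genome : List (List Int)) : Prop :=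
  2 ≤ genome.length ∧ ∀ x ∈ genome.dropLast, x ≠ []
instance (genome : List (List Int)) : Decidable (Pre_count_node_IO genome) := by
  unfold Pre_count_node_IO; infer_instance

def pvWitness_count_node_IO : List (List Int) := [[1], [2, 3]]

def Spec_count_node_IO (genome : List (List Int)) (out : List (String × Int)) : Prop :=
  out = count_node_IO_alt genome
instance (genome : List (List Int)) (out : List (String × Int)) :
    Decidable (Spec_count_node_IO genome out) := by unfold Spec_count_node_IO; infer_instance

-- ===== CLAIM (what is proved, stated in full; the proofs are below) =====
def Claim_equal_count_node_IO : Prop := ∀ (genome : List (List Int)),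
  Dom_count_node_IO genome → Pre_count_node_IO genome →
  Spec_count_node_IO genome (count_node_IO genome)

-- ===== LEMMAS AND PROOFS =====
-- the full key sequence A generates, in generation order
def allKeys (genome : List (List Int)) : List String :=
  keyFirst genome :: (PySem.List.pyRange 1 ((genome.length : Int) - 1) 1).map (keyMid genome)
    ++ [keyLast genome]

-- the key sequence B generates
def allKeysB (genome : List (List Int)) : List String :=
  keyFirstB ((PySem.List.slice genome none (some (-1))).foldl addRow []) ::
    (PySem.List.pyRange 1 ((genome.length : Int) - 1) 1).map
      (keyMidB (genome.map List.sum) ((PySem.List.slice genome none (some (-1))).foldl addRow []))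
    ++ [keyLastB (genome.map List.sum) (genome.length : Int)]

theorem countP_beq_comm (k : String) (keys : List String) :
    List.countP (fun key => k == key) keys = List.count k keys := by
  rw [List.count_eq_countP]
  exact List.countP_congr (fun x _ => by rw [Bool.beq_comm])

theorem count_node_IO_eq_counter (genome : List (List Int)) :
    count_node_IO genome = (PySem.Dict.counter (allKeys genome)).items := by
  unfold count_node_IO
  dsimp only
  rw [PySem.List.foldl_append_singleton_eq_map]
  have hkeys : [keyFirst genome] ++
      (PySem.List.pyRange 1 ((genome.length : Int) - 1) 1).map (keyMid genome)
      ++ [keyLast genome] = allKeys genome := by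
    simp [allKeys]
  rw [hkeys, PySem.Dict.items_counter]
  rw [PySem.Dict.items_foldl_insert_fresh (k := fun x => x)
    (v := fun k => ((allKeys genome).map (fun key => if k == key then (1 : Int) else 0)).sum)
    (PySem.Set.ofList (allKeys genome)) PySem.Dict.empty
    (by intro a _; rfl)
    (by simp [PySem.Set.nodup_ofList])]
  have hc : ∀ a : String, ((allKeys genome).map
      (fun key => if a == key then (1 : Int) else 0)).sum =
      ((List.countP (fun key => a == key) (allKeys genome) : Nat) : Int) :=
    fun a => PySem.List.sum_map_ite_one_zero _ _
  simp only [hc, countP_beq_comm]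
  simp [PySem.Dict.empty]

theorem count_node_IO_alt_eq_counter (genome : List (List Int)) :
    count_node_IO_alt genome = (PySem.Dict.counter (allKeysB genome)).items := by
  unfold count_node_IO_alt
  rw [← PySem.Dict.foldl_insert_getD_add_one_eq_counter (allKeysB genome)]
  unfold allKeysB
  simp only [List.foldl_cons, List.foldl_append, List.foldl_map, List.foldl_nil, bumpKey]

-- getD through List.modify (the in-place 'colsum[j] += v')
theorem getD_modify (l : List Int) (i : Nat) (f : Int → Int) (j : Nat) (d : Int) :
    (l.modify i f).getD j d = if i = j ∧ j < l.length then f (l.getD j d) else l.getD j d := by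
  simp only [List.getD_eq_getElem?_getD, List.getElem?_modify]
  by_cases h : i = j <;> by_cases h2 : j < l.length <;> simp [h, h2]

theorem addRowAux_getD (x : List Int) : ∀ (cs : List Int) (j : Nat),
    j + x.length ≤ cs.length → ∀ (k : Nat),
    (addRowAux cs x j).getD k 0 =
      cs.getD k 0 + (if j ≤ k ∧ k < j + x.length then x.getD (k - j) 0 else 0) := by
  induction x with
  | nil => intro cs j _ k; simp [addRowAux]
  | cons v t ih =>
    intro cs j h k
    rw [addRowAux, ih _ (j + 1) (by rw [List.length_modify]; simp at h ⊢; omega) k, getD_modify]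
    by_cases hk : k = j
    · subst hk
      have hlt : k < cs.length := by simp at h; omega
      simp [hlt]
    · have h1 : ¬(j = k ∧ k < cs.length) := fun ⟨a, _⟩ => hk a.symm
      rw [if_neg h1]
      by_cases h2 : j + 1 ≤ k ∧ k < j + 1 + t.length
      · have h3 : j ≤ k ∧ k < j + (v :: t).length := by simp; omega
        obtain ⟨m, hm⟩ : ∃ m, k - j = m + 1 := ⟨k - j - 1, by omega⟩
        have hm2 : k - (j + 1) = m := by omega
        rw [if_pos h2, if_pos h3, hm, hm2, List.getD_cons_succ]
      · have h3 : ¬(j ≤ k ∧ k < j + (v :: t).length) := by simp; simp at h2; omega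
        rw [if_neg h2, if_neg h3]

-- zero-padding on the right does not change getD _ 0
theorem getD_append_replicate_zero (cs : List Int) (m k : Nat) :
    (cs ++ List.replicate m (0 : Int)).getD k 0 = cs.getD k 0 := by
  simp only [List.getD_eq_getElem?_getD, List.getElem?_append]
  by_cases h : k < cs.length
  · simp [h]
  · simp only [if_neg h, List.getElem?_eq_none (show cs.length ≤ k by omega),
      List.getElem?_replicate]
    by_cases h2 : k - cs.length < m <;> simp [h2]

theorem addRow_getD (cs x : List Int) (k : Nat) :
    (addRow cs x).getD k 0 = cs.getD k 0 + (if k < x.length then x.getD k 0 else 0) := by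
  unfold addRow
  by_cases h : x.length > cs.length
  · rw [if_pos h, addRowAux_getD x _ 0 (by simp; omega) k, getD_append_replicate_zero]
    simp
  · rw [if_neg h, addRowAux_getD x _ 0 (by omega) k]
    simp

-- the column-sum fold computes, at every index k, the sum of x[k] over rows with len(x) > k
theorem colsum_getD (rows : List (List Int)) : ∀ (cs : List Int) (k : Nat),
    (rows.foldl addRow cs).getD k 0 =
      cs.getD k 0 + ((rows.filter (fun x => decide (k < x.length))).map
        (fun x => x.getD k 0)).sum := by
  induction rows with
  | nil => intro cs k; simp
  | cons x rows ih =>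
    intro cs k
    simp only [List.foldl_cons, ih, addRow_getD, List.filter_cons]
    by_cases hx : k < x.length <;> simp [hx, add_assoc]

-- terms filtered out being 0, the filtered sum equals the unfiltered one
theorem sum_map_filter_of_zero (p : List Int → Bool) (f : List Int → Int)
    (rows : List (List Int)) (h : ∀ x, p x = false → f x = 0) :
    ((rows.filter p).map f).sum = (rows.map f).sum := by
  induction rows with
  | nil => rfl
  | cons x rows ih =>
    by_cases hx : p x
    · simp [hx, ih]
    · simp [hx, ih, h x (by simpa using hx)]

theorem keyFirst_eq (genome : List (List Int)) :
    keyFirstB ((PySem.List.slice genome none (some (-1))).foldl addRow []) = keyFirst genome := by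
  unfold keyFirstB keyFirst
  congr 1
  congr 1
  rw [PySem.List.pyGetD_zero, colsum_getD]
  rw [sum_map_filter_of_zero _ _ _ (fun x hx => by
    have : x.length = 0 := by simpa using hx
    simp [List.eq_nil_of_length_eq_zero this])]
  simp [PySem.List.pyGetD_zero]

theorem keyMid_eq (genome : List (List Int)) (i : Int) (hi : 1 ≤ i) :
    keyMidB (genome.map List.sum) ((PySem.List.slice genome none (some (-1))).foldl addRow []) i
      = keyMid genome i := by
  obtain ⟨m, rfl⟩ : ∃ m : Nat, i = ((m : Nat) : Int) :=
    ⟨i.toNat, (Int.toNat_of_nonneg (by omega)).symm⟩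
  unfold keyMidB keyMid
  set colsum := (PySem.List.slice genome none (some (-1))).foldl addRow [] with hcs
  have ha : PySem.List.pyGetD (genome.map List.sum) ((m : Int) - 1) 0
      = (PySem.List.pyGetD genome ((m : Int) - 1) []).sum := by
    simpa using PySem.List.pyGetD_map List.sum genome ((m : Int) - 1) []
  have hval : (if (m : Int) < (colsum.length : Int) then PySem.List.pyGetD colsum (m : Int) 0 else 0)
      = colsum.getD m 0 := by
    by_cases h : (m : Int) < (colsum.length : Int)
    · simp [h]
    · rw [if_neg h, List.getD_eq_default]
      omega
  have hb : colsum.getD m 0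
      = (((PySem.List.slice genome none (some (-1))).filter
          (fun x => decide ((m : Int) < (x.length : Int)))).map
            (fun x => PySem.List.pyGetD x (m : Int) 0)).sum := by
    rw [hcs, colsum_getD]
    simp [Nat.cast_lt]
  rw [ha, hval, hb]
theorem keyLast_eq (genome : List (List Int)) (h2 : 2 ≤ genome.length) :
    keyLastB (genome.map List.sum) (genome.length : Int) = keyLast genome := by
  unfold keyLastB keyLast
  congr 2
  have hcast : ((genome.length : Int) - 2) = ((genome.length - 2 : Nat) : Int) := by omega
  rw [hcast]
  have := PySem.List.pyGetD_map List.sum genome ((genome.length - 2 : Nat) : Int) []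
  rw [show ((0:Int) = List.sum ([] : List Int)) from rfl, this]
  congr 1
  rw [PySem.List.pyGetD_neg_ofNat genome 2 [] (by omega) (by omega)]
  simp [List.getD_eq_getElem?_getD, List.getElem?_eq_getElem (by omega : genome.length - 2 < genome.length)]

theorem allKeysB_eq (genome : List (List Int)) (h2 : 2 ≤ genome.length) :
    allKeysB genome = allKeys genome := by
  unfold allKeysB allKeys
  have hmid : (PySem.List.pyRange 1 ((genome.length : Int) - 1) 1).map
        (keyMidB (genome.map List.sum)
          ((PySem.List.slice genome none (some (-1))).foldl addRow []))
      = (PySem.List.pyRange 1 ((genome.length : Int) - 1) 1).map (keyMid genome) :=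
    List.map_congr_left (fun i hi => keyMid_eq genome i (PySem.List.mem_pyRange_one.mp hi).1)
  rw [keyFirst_eq genome, keyLast_eq genome h2, hmid]

-- ===== VERDICT (by name: the statement is the Claim_ definition above) =====
theorem count_node_IO_spec : Claim_equal_count_node_IO := by
  intro genome _ hpre
  unfold Spec_count_node_IO
  rw [count_node_IO_eq_counter, count_node_IO_alt_eq_counter, allKeysB_eq genome hpre.1]
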